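-- pv_equiv track=rewrite | github.com/mmingyu/BOJ | foobar_3_3.py | solution
-- ===== SOURCE A (Python) =====
-- def solution(x, y):
--     x, y = int(x), int(y)
--     if x > y: x, y = y, x
--
--     ans = 0
--     while x > 1:
--         if x < 1 or y < 1: break
--         ans += (y // x)
--         y -= x * (y // x)
--         y, x = x, y % x
--     if x < 1: return 'impossible'
--     return str(ans + y - x)
-- ===== SOURCE B (Python) =====
-- def solution(x, y):
--     x, y = int(x), int(y)
--     if x > y:
--         x, y = y, x
--
--     def go(a, b, ans):
--         if a < 1:
--             return 'impossible'
--         if a == 1: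
--             return str(ans + b - 1)
--         return go(b % a, a, ans + b // a)
--
--     return go(x, y, 0)
-- ===== Notes on version B (the rewrite author's own statement) =====
-- stated objective: idiomatic
-- what changed: Replaces A's while-loop with in-place swaps, an explicit break guard and a redundant 'y -= x*(y//x)' step by a direct recursive Euclidean/continued-fraction reduction go(a,b,ans) with two base cases.
import Mathlib
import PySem

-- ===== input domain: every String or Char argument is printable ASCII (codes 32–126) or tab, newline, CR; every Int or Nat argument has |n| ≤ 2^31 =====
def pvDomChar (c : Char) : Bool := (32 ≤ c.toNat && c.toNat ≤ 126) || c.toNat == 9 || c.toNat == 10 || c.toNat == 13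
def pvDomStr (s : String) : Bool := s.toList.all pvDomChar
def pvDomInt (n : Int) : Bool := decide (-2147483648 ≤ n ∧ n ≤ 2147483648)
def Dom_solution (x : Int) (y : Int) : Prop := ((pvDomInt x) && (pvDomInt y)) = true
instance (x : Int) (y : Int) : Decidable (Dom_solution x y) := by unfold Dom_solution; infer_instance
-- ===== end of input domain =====

-- B replaces A's while-loop (with explicit break guard and redundant remainder step)
-- by a direct recursive Euclidean reduction; same result, same asymptotic cost (objective: idiomatic).

-- ===== PORT A =====
-- the while loop of A: state (x, y, ans); returns the state at loop exit (incl. the break)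
def solutionLoop (x y ans : Int) : Int × Int × Int :=
  if _h : 1 < x then
    if x < 1 ∨ y < 1 then (x, y, ans)
    else
      -- ans += y // x ; y -= x * (y // x) ; y, x = x, y % x   (A recomputes y // x each time)
      solutionLoop (PySem.Int.mod (y - x * PySem.Int.floordiv y x) x) x
        (ans + PySem.Int.floordiv y x)
  else (x, y, ans)
termination_by x.toNat
decreasing_by
  have h0 : (0:Int) < x := by omega
  have h2 : (y - x * PySem.Int.floordiv y x).fmod x = (y - x * PySem.Int.floordiv y x) % x := by
    rw [Int.fmod_eq_emod]; simp [Or.inl h0.le]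
  have h3 : 0 ≤ (y - x * PySem.Int.floordiv y x) % x := Int.emod_nonneg _ (by omega)
  have h4 : (y - x * PySem.Int.floordiv y x) % x < x := Int.emod_lt_of_pos _ h0
  have h1 : PySem.Int.mod (y - x * PySem.Int.floordiv y x) x
      = (y - x * PySem.Int.floordiv y x).fmod x := rfl
  omega

def solution (x : Int) (y : Int) : String :=
  let p := if x > y then (y, x) else (x, y)
  let r := solutionLoop p.1 p.2 0
  if r.1 < 1 then "impossible" else PySem.Int.toStr (r.2.1 + r.2.2 - r.1)

-- ===== PORT B =====
def solutionGo (a b ans : Int) : String :=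
  if _h : a < 1 then "impossible"
  else if a = 1 then PySem.Int.toStr (ans + b - 1)
  else solutionGo (PySem.Int.mod b a) a (ans + PySem.Int.floordiv b a)
termination_by a.toNat
decreasing_by
  have h0 : (0:Int) < a := by omega
  have h2 : b.fmod a = b % a := by
    rw [Int.fmod_eq_emod]; simp [Or.inl h0.le]
  have h3 : 0 ≤ b % a := Int.emod_nonneg b (by omega)
  have h4 : b % a < a := Int.emod_lt_of_pos b h0
  have h1 : PySem.Int.mod b a = b.fmod a := rfl
  omega

def solution_alt (x : Int) (y : Int) : String :=
  let p := if x > y then (y, x) else (x, y)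
  solutionGo p.1 p.2 0

-- ===== PRECONDITION & SPEC =====
def Spec_solution (x : Int) (y : Int) (out : String) : Prop := out = solution_alt x y
instance (x : Int) (y : Int) (out : String) : Decidable (Spec_solution x y out) := by unfold Spec_solution; infer_instance

-- ===== CLAIM (what is proved, stated in full; the proofs are below) =====
def Claim_equal_solution : Prop := ∀ (x : Int) (y : Int), Dom_solution x y → Spec_solution x y (solution x y)

-- ===== LEMMAS AND PROOFS =====

-- with x ≤ y, the post-processed loop of A equals B's recursion
theorem loop_eq_go (n : Nat) (x y ans : Int) (hn : x.toNat ≤ n) (hxy : x ≤ y) :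
    (let r := solutionLoop x y ans
     if r.1 < 1 then "impossible" else PySem.Int.toStr (r.2.1 + r.2.2 - r.1)) =
    solutionGo x y ans := by
  induction n generalizing x y ans with
  | zero =>
    -- x ≤ 0 here
    have hx : x < 1 := by omega
    rw [solutionLoop, solutionGo]
    simp [hx]
  | succ n ih =>
    by_cases hx1 : 1 < x
    · -- step case: y ≥ x > 1, break guard false
      have hy : ¬ (x < 1 ∨ y < 1) := by omega
      rw [solutionLoop]
      simp only [hx1, hy, dif_pos, if_neg, not_false_iff]
      have h0 : (0:Int) < x := by omega
      have hmod : ∀ a : Int, PySem.Int.mod a x = a % x := by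
        intro a
        show a.fmod x = a % x
        rw [Int.fmod_eq_emod]; simp [Or.inl h0.le]
      have hq : y - x * PySem.Int.floordiv y x = y % x := by
        rw [PySem.Int.floordiv_eq_ediv_of_pos h0, Int.emod_def]
      have hmm : PySem.Int.mod (y - x * PySem.Int.floordiv y x) x = y % x := by
        rw [hmod, hq, Int.emod_emod_of_dvd _ dvd_rfl]
      have h3 : 0 ≤ y % x := Int.emod_nonneg y (by omega)
      have h4 : y % x < x := Int.emod_lt_of_pos y h0
      rw [hmm, ih (y % x) x _ (by omega) (by omega)]
      conv_rhs => rw [solutionGo]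
      simp only [hmod]
      rw [if_neg (by omega : ¬ x = 1), dif_neg (by omega : ¬ x < 1)]
    · -- loop exits: x ≤ 1
      rw [solutionLoop, solutionGo]
      by_cases hx0 : x < 1
      · simp [hx1, hx0]
      · have hx : x = 1 := by omega
        simp only [hx]
        norm_num
        congr 1
        ring

-- ===== VERDICT (by name: the statement is the Claim_ definition above) =====
theorem solution_spec : Claim_equal_solution := by
  intro x y _
  unfold Spec_solution solution solution_alt
  by_cases h : x > y
  · simp only [h, if_pos]
    exact loop_eq_go y.toNat y x 0 le_rfl (by omega)
  · simp only [h, if_neg, not_false_iff]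
    exact loop_eq_go x.toNat x y 0 le_rfl (by omega)
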